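-- pv_equiv track=rewrite | github.com/ZijieChin/StaffCheck | funcs.py | phone_to_multi_customers
-- ===== SOURCE A (Python) =====
-- def phone_to_multi_customers(reslist: list):
--     result_dict = {}
--     for item in reslist:
--         if item[0] in result_dict:
--             result_dict[item[0]] += "\n" + item[1]
--         else:
--             result_dict[item[0]] = item[1]
--
--     result_list = [(k, v) for k, v in result_dict.items()]
--     return result_list
-- ===== SOURCE B (Python) =====
-- def phone_to_multi_customers(reslist: list):
--     keys = []
--     for item in reslist:
--         if item[0] not in keys:
--             keys.append(item[0])
--     return [(k, "\n".join(item[1] for item in reslist if item[0] == k))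
--             for k in keys]
-- ===== Notes on version B (the rewrite author's own statement) =====
-- stated objective: alternative
-- what changed: B keeps no dict at all: it first collects the distinct keys in order of first appearance, then for each key re-scans the whole input to gather and join that key's values, instead of A's single-pass dict with incremental string concatenation.
import Mathlib
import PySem

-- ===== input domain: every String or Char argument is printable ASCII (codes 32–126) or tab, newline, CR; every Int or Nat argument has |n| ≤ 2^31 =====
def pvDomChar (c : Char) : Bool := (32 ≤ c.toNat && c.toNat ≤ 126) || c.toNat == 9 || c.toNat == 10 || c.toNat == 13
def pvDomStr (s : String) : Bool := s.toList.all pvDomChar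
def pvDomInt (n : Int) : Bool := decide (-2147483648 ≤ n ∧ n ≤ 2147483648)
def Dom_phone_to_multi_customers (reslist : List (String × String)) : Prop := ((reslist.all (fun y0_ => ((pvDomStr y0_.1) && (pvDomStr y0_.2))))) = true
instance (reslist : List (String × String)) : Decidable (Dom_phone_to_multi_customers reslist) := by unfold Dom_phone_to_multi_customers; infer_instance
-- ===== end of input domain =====

-- B keeps no dict: it lists the distinct keys in first-appearance order, then re-scans the
-- input once per key to gather and join that key's values (objective: alternative; same value).

-- ===== PORT A =====
-- one loop iteration of A: if item[0] in result_dict: result_dict[item[0]] += "\n" + item[1] else: result_dict[item[0]] = item[1]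
def stepA (d : PySem.Dict String String) (item : String × String) : PySem.Dict String String :=
  if d.contains item.1 then
    d.insert item.1 (d.getD item.1 "" ++ ("\n" ++ item.2))
  else
    d.insert item.1 item.2

def phone_to_multi_customers (reslist : List (String × String)) : List (String × String) :=
  ((reslist.foldl stepA PySem.Dict.empty).items).map (fun p => (p.1, p.2))

-- ===== PORT B =====
-- first loop of B: keys = []; for item in reslist: if item[0] not in keys: keys.append(item[0])
def firstKeys (reslist : List (String × String)) : List String :=
  reslist.foldl (fun ks item => if item.1 ∈ ks then ks else ks ++ [item.1]) []

-- the generator: (item[1] for item in reslist if item[0] == k)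
def valuesOf (reslist : List (String × String)) (k : String) : List String :=
  (reslist.filter (fun item => item.1 == k)).map (fun item => item.2)

def phone_to_multi_customers_alt (reslist : List (String × String)) : List (String × String) :=
  (firstKeys reslist).map (fun k => (k, PySem.Str.join "\n" (valuesOf reslist k)))

-- ===== PRECONDITION & SPEC =====
def Spec_phone_to_multi_customers (reslist : List (String × String)) (out : List (String × String)) : Prop := out = phone_to_multi_customers_alt reslist
instance (reslist : List (String × String)) (out : List (String × String)) : Decidable (Spec_phone_to_multi_customers reslist out) := by unfold Spec_phone_to_multi_customers; infer_instance

-- ===== CLAIM (what is proved, stated in full; the proofs are below) =====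
def Claim_equal_phone_to_multi_customers : Prop := ∀ (reslist : List (String × String)), Dom_phone_to_multi_customers reslist → Spec_phone_to_multi_customers reslist (phone_to_multi_customers reslist)

-- ===== LEMMAS AND PROOFS =====

-- joining one group of one element is that element
theorem strJoin_singleton (s v : String) : PySem.Str.join s [v] = v := by
  apply String.toList_inj.mp
  simp [PySem.Str.toList_join, PySem.Chars.join_singleton]

theorem charsJoin_append_singleton (sep y : List Char) :
    ∀ (xs : List (List Char)), xs ≠ [] →
      PySem.Chars.join sep (xs ++ [y]) = PySem.Chars.join sep xs ++ sep ++ y := by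
  intro xs
  induction xs with
  | nil => intro h; exact absurd rfl h
  | cons x rest ih =>
    intro _
    cases rest with
    | nil =>
      simp only [List.nil_append, List.cons_append]
      rw [PySem.Chars.join_cons_cons, PySem.Chars.join_singleton, PySem.Chars.join_singleton]
    | cons z rest' =>
      rw [show ((x :: z :: rest') ++ [y] : List (List Char)) = x :: z :: (rest' ++ [y]) from rfl]
      rw [PySem.Chars.join_cons_cons]
      rw [show (z :: (rest' ++ [y]) : List (List Char)) = (z :: rest') ++ [y] from rfl]
      rw [ih (by simp), PySem.Chars.join_cons_cons]
      simp [List.append_assoc]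

-- appending one more customer to a nonempty group, seen through the join
theorem strJoin_append_singleton (s v : String) (vs : List String) (h : vs ≠ []) :
    PySem.Str.join s (vs ++ [v]) = PySem.Str.join s vs ++ s ++ v := by
  apply String.toList_inj.mp
  simp only [PySem.Str.toList_join, List.map_append, List.map_cons, List.map_nil,
    String.toList_append]
  exact charsJoin_append_singleton s.toList v.toList (vs.map String.toList) (by simpa using h)

-- firstKeys of an extended list
theorem firstKeys_append_singleton (l : List (String × String)) (x : String × String) :
    firstKeys (l ++ [x]) =
      if x.1 ∈ firstKeys l then firstKeys l else firstKeys l ++ [x.1] := by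
  simp [firstKeys, List.foldl_append]

-- valuesOf of an extended list
theorem valuesOf_append_singleton (l : List (String × String)) (x : String × String) (k : String) :
    valuesOf (l ++ [x]) k = valuesOf l k ++ (if x.1 == k then [x.2] else []) := by
  simp only [valuesOf, List.filter_append]
  by_cases h : x.1 == k <;> simp [List.filter, h]

-- membership in firstKeys is membership among the first components
theorem mem_firstKeys_aux (l : List (String × String)) :
    ∀ (acc : List String) (k : String),
      (k ∈ l.foldl (fun ks item => if item.1 ∈ ks then ks else ks ++ [item.1]) acc)
        ↔ (k ∈ acc ∨ k ∈ l.map Prod.fst) := by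
  induction l with
  | nil => intro acc k; simp
  | cons x rest ih =>
    intro acc k
    simp only [List.foldl_cons, List.map_cons, List.mem_cons]
    by_cases h : x.1 ∈ acc
    · rw [if_pos h, ih]
      constructor
      · rintro (h1 | h2); · exact Or.inl h1
        · exact Or.inr (Or.inr h2)
      · rintro (h1 | h1 | h1)
        · exact Or.inl h1
        · exact Or.inl (h1 ▸ h)
        · exact Or.inr h1
    · rw [if_neg h, ih]
      simp only [List.mem_append, List.mem_singleton]
      tauto

theorem mem_firstKeys (l : List (String × String)) (k : String) :
    k ∈ firstKeys l ↔ k ∈ l.map Prod.fst := by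
  rw [firstKeys, mem_firstKeys_aux]; simp

-- a key that occurs has a nonempty group
theorem valuesOf_ne_nil (l : List (String × String)) (k : String)
    (h : k ∈ l.map Prod.fst) : valuesOf l k ≠ [] := by
  obtain ⟨p, hp, hk⟩ := List.mem_map.mp h
  have : p.2 ∈ valuesOf l k := by
    exact List.mem_map.mpr ⟨p, List.mem_filter.mpr ⟨hp, by simp [hk]⟩, rfl⟩
  intro hnil; rw [hnil] at this; exact absurd this (List.not_mem_nil)

-- the whole-list view of B at the point just after processing prefix l
def viewB (l : List (String × String)) : List (String × String) :=
  (firstKeys l).map (fun k => (k, PySem.Str.join "\n" (valuesOf l k)))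

-- main invariant: A's dict after folding l is B's grouped view of l
theorem fold_view (l : List (String × String)) :
    (l.foldl stepA PySem.Dict.empty).items = viewB l ∧
    (l.foldl stepA PySem.Dict.empty).keys.Nodup := by
  induction l using List.reverseRecOn with
  | nil =>
    exact ⟨by simp [viewB, firstKeys]; rfl,
           PySem.Dict.nodup_keys_empty⟩
  | append_singleton l x ih =>
    obtain ⟨hitems, hnodup⟩ := ih
    set d := l.foldl stepA PySem.Dict.empty with hd
    have hfold : (l ++ [x]).foldl stepA PySem.Dict.empty = stepA d x := by
      simp [List.foldl_append, hd]
    have hkeys : d.keys = firstKeys l := by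
      simp only [PySem.Dict.keys, hitems, viewB, List.map_map]
      exact List.map_id (firstKeys l)
    have hcont : d.contains x.1 = decide (x.1 ∈ firstKeys l) := by
      rw [PySem.Dict.contains_eq_decide_mem_keys, hkeys]
    constructor
    · rw [hfold]
      by_cases hmem : x.1 ∈ firstKeys l
      · -- key present: A updates in place; B's key list is unchanged, x.1's group grows
        have hc : d.contains x.1 = true := by rw [hcont]; simpa
        have hvne : valuesOf l x.1 ≠ [] :=
          valuesOf_ne_nil l x.1 ((mem_firstKeys l x.1).mp hmem)
        have hmemd : (x.1, PySem.Str.join "\n" (valuesOf l x.1)) ∈ d.items := by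
          rw [hitems]; exact List.mem_map.mpr ⟨x.1, hmem, rfl⟩
        have hgetD : d.getD x.1 "" = PySem.Str.join "\n" (valuesOf l x.1) :=
          PySem.Dict.getD_of_mem_items _ hmemd hnodup ""
        have hstep : stepA d x = d.insert x.1 (d.getD x.1 "" ++ ("\n" ++ x.2)) := by
          simp [stepA, hc]
        rw [hstep, PySem.Dict.items_insert_of_contains _ _ hc, hitems]
        unfold viewB
        rw [firstKeys_append_singleton, if_pos hmem, List.map_map]
        apply List.map_congr_left
        intro k hk
        rw [valuesOf_append_singleton]
        by_cases hkx : k = x.1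
        · subst hkx
          simp only [Function.comp, beq_self_eq_true, if_true]
          rw [hgetD, strJoin_append_singleton _ _ _ hvne, String.append_assoc]
        · have : (x.1 == k) = false := by simp [Ne.symm hkx]
          simp [Function.comp, hkx, this]
      · -- fresh key: A appends; B's key list grows, other groups unchanged
        have hc : d.contains x.1 = false := by rw [hcont]; simpa
        have hstep : stepA d x = d.insert x.1 x.2 := by simp [stepA, hc]
        rw [hstep, PySem.Dict.items_insert_of_not_contains _ _ hc, hitems]
        unfold viewB
        rw [firstKeys_append_singleton, if_neg hmem, List.map_append]
        congr 1
        · apply List.map_congr_left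
          intro k hk
          rw [valuesOf_append_singleton]
          have hkx : k ≠ x.1 := fun h => hmem (h ▸ hk)
          have : (x.1 == k) = false := by simp [Ne.symm hkx]
          simp [this]
        · have hnot : x.1 ∉ l.map Prod.fst := fun h => hmem ((mem_firstKeys l x.1).mpr h)
          have hfilt : valuesOf (l ++ [x]) x.1 = [x.2] := by
            rw [valuesOf_append_singleton]
            have : valuesOf l x.1 = [] := by
              unfold valuesOf
              rw [List.filter_eq_nil_iff.mpr, List.map_nil]
              intro p hp hb
              exact hnot (List.mem_map.mpr ⟨p, hp, by simpa using hb⟩)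
            simp [this]
          simp [hfilt, strJoin_singleton]
    · rw [hfold]
      unfold stepA
      split <;> exact PySem.Dict.nodup_keys_insert _ _ _ hnodup

-- ===== VERDICT (by name: the statement is the Claim_ definition above) =====
theorem phone_to_multi_customers_spec : Claim_equal_phone_to_multi_customers := by
  intro reslist _
  show phone_to_multi_customers reslist = phone_to_multi_customers_alt reslist
  unfold phone_to_multi_customers phone_to_multi_customers_alt
  rw [(fold_view reslist).1]
  simp [viewB]
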